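-- pv_equiv track=rewrite | github.com/AutoclickerI/Baekjoon | 백준/Bronze/22810. When Can We Meet？/When Can We Meet？.py | find_best_meeting_date
-- ===== SOURCE A (Python) =====
-- def find_best_meeting_date(test_cases):
--     results = []
--
--     for case in test_cases:
--         N, Q = case[0]
--         if N == 0 and Q == 0:
--             break
--
--         # Dictionary to count how many members are available on each date
--         date_counts = {}
--
--         # Process each member's convenient dates
--         for member_dates in case[1]:
--             for date in member_dates:
--                 if date not in date_counts:
--                     date_counts[date] = 0
--                 date_counts[date] += 1
--
--         # Find the best date that meets the quorum and has the most members
--         best_date = 0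
--         max_members = 0
--
--         for date, count in sorted(date_counts.items()):
--             if count >= Q and count > max_members:
--                 best_date = date
--                 max_members = count
--
--         # If no date meets the quorum, return 0
--         if max_members == 0:
--             results.append(0)
--         else:
--             results.append(best_date)
--
--     return results
-- ===== SOURCE B (Python) =====
-- def find_best_meeting_date(test_cases):
--     # Recursive head/tail decomposition; no dict and no sort per case:
--     # distinct dates by first occurrence, counts via dates.count, then a
--     # two-stage max-count / min-date selection.
--     if not test_cases:
--         return []
--     (N, Q), members = test_cases[0]
--     if N == 0 and Q == 0:
--         return []
--     dates = [d for ds in members for d in ds]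
--     distinct = list(dict.fromkeys(dates))
--     eligible = [d for d in distinct if dates.count(d) >= Q]
--     if not eligible:
--         best = 0
--     else:
--         m = max(dates.count(d) for d in eligible)
--         best = min(d for d in eligible if dates.count(d) == m)
--     return [best] + find_best_meeting_date(test_cases[1:])
-- ===== Notes on version B (the rewrite author's own statement) =====
-- stated objective: alternative
-- what changed: A builds a per-case dict of counts with a two-step conditional insert, sorts its items and scans them with a running (best_date, max_members) accumulator inside an imperative loop over cases; B is recursive over the case list and per case uses no dict and no sort: it dedups the flattened dates, keeps those whose dates.count meets the quorum, then takes max of the counts and the min date achieving it.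
import Mathlib
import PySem

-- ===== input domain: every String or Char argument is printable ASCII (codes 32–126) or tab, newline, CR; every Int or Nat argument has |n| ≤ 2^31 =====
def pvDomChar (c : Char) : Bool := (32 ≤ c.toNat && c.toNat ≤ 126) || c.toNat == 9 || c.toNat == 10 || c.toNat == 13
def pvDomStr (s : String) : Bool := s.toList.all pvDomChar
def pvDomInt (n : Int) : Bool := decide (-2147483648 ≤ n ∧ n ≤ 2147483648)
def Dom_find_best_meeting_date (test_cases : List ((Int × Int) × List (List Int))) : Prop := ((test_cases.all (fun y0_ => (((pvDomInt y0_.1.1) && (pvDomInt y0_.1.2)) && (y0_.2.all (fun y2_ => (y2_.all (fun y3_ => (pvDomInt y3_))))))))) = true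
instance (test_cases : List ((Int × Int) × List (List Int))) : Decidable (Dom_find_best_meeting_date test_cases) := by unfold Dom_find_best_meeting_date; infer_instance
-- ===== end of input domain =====

-- B is a recursive, dict-free and sort-free alternative: per case it dedups the flattened
-- dates, filters by quorum via dates.count, then picks max count and min date achieving it.

-- ===== PORT A =====
-- per-case body of A: count dates in a dict, scan sorted items keeping (best_date, max_members)
def pvA_case (Q : Int) (members : List (List Int)) : Int :=
  let date_counts : PySem.Dict Int Int :=
    members.foldl (fun d member_dates =>
      member_dates.foldl (fun d date =>
        let d' := if d.contains date then d else d.insert date 0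
        d'.insert date (d'.getD date 0 + 1)) d) PySem.Dict.empty
  let res : Int × Int :=
    (PySem.List.sorted2 date_counts.items Prod.fst Prod.snd).foldl
      (fun s dc => if Q ≤ dc.2 ∧ s.2 < dc.2 then (dc.1, dc.2) else s) ((0 : Int), (0 : Int))
  if res.2 = 0 then 0 else res.1

-- A's loop over test cases ('break' on N == 0 and Q == 0 returns the results built so far)
def pvA_loop : List ((Int × Int) × List (List Int)) → List Int → List Int
  | [], results => results
  | c :: rest, results =>
    if c.1.1 = 0 ∧ c.1.2 = 0 then results
    else pvA_loop rest (results ++ [pvA_case c.1.2 c.2])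

def find_best_meeting_date (test_cases : List ((Int × Int) × List (List Int))) : List Int :=
  pvA_loop test_cases []

-- ===== PORT B =====
-- per-case body of B: dedup the flattened dates, filter by quorum using dates.count,
-- then max of the counts followed by min of the dates achieving that max
def pvB_best (Q : Int) (members : List (List Int)) : Int :=
  let dates := members.flatten
  let distinct := PySem.List.dedup dates
  let eligible := distinct.filter (fun d => decide (Q ≤ ((dates.count d : Nat) : Int)))
  match eligible with
  | [] => 0
  | _ :: _ =>
    let m := (PySem.List.max? (eligible.map fun d => ((dates.count d : Nat) : Int)) (fun x => x)).getD 0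
    (PySem.List.min? (eligible.filter fun d => decide (((dates.count d : Nat) : Int) = m)) (fun x => x)).getD 0

-- B's recursion over the case list: empty or sentinel head gives [], else cons the best date
def find_best_meeting_date_alt : List ((Int × Int) × List (List Int)) → List Int
  | [] => []
  | ((N, Q), members) :: rest =>
    if N = 0 ∧ Q = 0 then []
    else pvB_best Q members :: find_best_meeting_date_alt rest

-- ===== PRECONDITION & SPEC =====
def Spec_find_best_meeting_date (test_cases : List ((Int × Int) × List (List Int))) (out : List Int) : Prop := out = find_best_meeting_date_alt test_cases
instance (test_cases : List ((Int × Int) × List (List Int))) (out : List Int) : Decidable (Spec_find_best_meeting_date test_cases out) := by unfold Spec_find_best_meeting_date; infer_instance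

-- ===== CLAIM (what is proved, stated in full; the proofs are below) =====
def Claim_equal_find_best_meeting_date : Prop := ∀ (test_cases : List ((Int × Int) × List (List Int))), Dom_find_best_meeting_date test_cases → Spec_find_best_meeting_date test_cases (find_best_meeting_date test_cases)

-- ===== LEMMAS AND PROOFS =====

-- A's two-step counting ('insert 0 if absent, then += 1') is the one-step 'insert getD+1'
theorem pv_count_step_eq :
    (fun (d : PySem.Dict Int Int) (date : Int) =>
      let d' := if d.contains date then d else d.insert date 0
      d'.insert date (d'.getD date 0 + 1))
    = (fun (d : PySem.Dict Int Int) (date : Int) => d.insert date (d.getD date 0 + 1)) := by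
  funext d date
  by_cases h : d.contains date
  · simp [h]
  · simp only [Bool.not_eq_true] at h
    simp [h, PySem.Dict.getD_insert_self, PySem.Dict.insert_insert_self,
      PySem.Dict.getD_of_not_contains d 0 h]

-- A's nested counting loop builds the Counter of the flattened date lists
theorem pv_counts_eq (members : List (List Int)) :
    members.foldl (fun d member_dates =>
      member_dates.foldl (fun d date => d.insert date (d.getD date 0 + 1)) d) PySem.Dict.empty
    = PySem.Dict.counter members.flatten := by
  rw [← PySem.Dict.foldl_insert_getD_add_one_eq_counter, List.foldl_flatten]

-- the sorted2 insertion: inserting a pair with a fresh first component into a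
-- strictly fst-increasing list keeps it strictly fst-increasing
theorem pv_insertBy_pairwise (x : Int × Int) :
    ∀ (acc : List (Int × Int)),
      acc.Pairwise (fun a b => a.1 < b.1) → (∀ y ∈ acc, x.1 ≠ y.1) →
      (PySem.List.insertBy
        (fun a b => decide (a.1 < b.1) || !decide (b.1 < a.1) && decide (a.2 < b.2)) x acc).Pairwise
        (fun a b => a.1 < b.1) := by
  intro acc
  induction acc with
  | nil => intro _ _; simp [PySem.List.insertBy]
  | cons y ys ih =>
    intro hpw hne
    rcases List.pairwise_cons.mp hpw with ⟨hy, hys⟩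
    by_cases hlt : (decide (x.1 < y.1) || !decide (y.1 < x.1) && decide (x.2 < y.2)) = true
    · have hxy : x.1 < y.1 := by
        have := hne y (by simp)
        simp only [Bool.or_eq_true, Bool.and_eq_true, Bool.not_eq_true', decide_eq_true_eq,
          decide_eq_false_iff_not] at hlt
        omega
      simp only [PySem.List.insertBy, hlt, if_true]
      refine List.pairwise_cons.mpr ⟨?_, hpw⟩
      intro z hz
      rcases List.mem_cons.mp hz with rfl | hz
      · exact hxy
      · exact lt_trans hxy (hy z hz)
    · have hyx : y.1 < x.1 := by
        have := hne y (by simp)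
        simp only [Bool.or_eq_true, Bool.and_eq_true, Bool.not_eq_true', decide_eq_true_eq,
          decide_eq_false_iff_not] at hlt
        omega
      simp only [PySem.List.insertBy, hlt]
      refine List.pairwise_cons.mpr ⟨?_, ih hys (fun z hz => hne z (by simp [hz]))⟩
      intro z hz
      rcases (PySem.List.mem_insertBy _ x z ys).mp hz with rfl | hz
      · exact hyx
      · exact hy z hz

-- sorted2 by (fst, snd) of a list with pairwise-distinct first components is strictly fst-increasing
theorem pv_sorted2_pairwise_fst (I : List (Int × Int)) (hnd : (I.map Prod.fst).Nodup) :
    (PySem.List.sorted2 I Prod.fst Prod.snd).Pairwise (fun a b => a.1 < b.1) := by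
  have main : ∀ (l acc : List (Int × Int)),
      acc.Pairwise (fun a b => a.1 < b.1) →
      (∀ y ∈ acc, ∀ x ∈ l, y.1 ≠ x.1) →
      (l.map Prod.fst).Nodup →
      (l.foldl (fun acc x => PySem.List.insertBy
        (fun a b => decide (a.1 < b.1) || !decide (b.1 < a.1) && decide (a.2 < b.2)) x acc) acc).Pairwise
        (fun a b => a.1 < b.1) := by
    intro l
    induction l with
    | nil => intro acc h _ _; simpa using h
    | cons x t ih =>
      intro acc hpw hsep hnd
      simp only [List.map_cons, List.nodup_cons, List.mem_map] at hnd
      simp only [List.foldl_cons]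
      apply ih
      · exact pv_insertBy_pairwise x acc hpw (fun y hy => (hsep y hy x (by simp)).symm)
      · intro y hy z hz
        rcases (PySem.List.mem_insertBy _ x y acc).mp hy with rfl | hy
        · intro h; exact hnd.1 ⟨z, hz, h.symm⟩
        · exact hsep y hy z (by simp [hz])
      · exact hnd.2
  simpa [PySem.List.sorted2] using main I [] (by simp) (by simp) hnd

-- A's inner scan over sorted items equals the same scan over the quorum-filtered list
theorem pv_fold_filter (Q : Int) (S : List (Int × Int)) (s0 : Int × Int) :
    S.foldl (fun s dc => if Q ≤ dc.2 ∧ s.2 < dc.2 then (dc.1, dc.2) else s) s0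
    = (S.filter (fun p => decide (Q ≤ p.2))).foldl
        (fun s dc => if s.2 < dc.2 then dc else s) s0 := by
  rw [List.foldl_filter]
  congr 1
  funext s dc
  by_cases h1 : Q ≤ dc.2 <;> by_cases h2 : s.2 < dc.2 <;> simp [h1, h2]

-- what A's running-max scan computes on a strictly fst-increasing list of positive counts:
-- the first element of maximal count, i.e. the max-count element of smallest date
theorem pv_foldA_aux :
    ∀ (F : List (Int × Int)) (s : Int × Int),
      F.Pairwise (fun a b => a.1 < b.1) → (∀ q ∈ F, 0 < q.2) → 0 < s.2 → (∀ q ∈ F, s.1 < q.1) →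
      ((F.foldl (fun s dc => if s.2 < dc.2 then dc else s) s = s ∨
        (F.foldl (fun s dc => if s.2 < dc.2 then dc else s) s ∈ F ∧
          s.2 < (F.foldl (fun s dc => if s.2 < dc.2 then dc else s) s).2)) ∧
       ∀ q ∈ s :: F, q.2 < (F.foldl (fun s dc => if s.2 < dc.2 then dc else s) s).2 ∨
         (q.2 = (F.foldl (fun s dc => if s.2 < dc.2 then dc else s) s).2 ∧
          (F.foldl (fun s dc => if s.2 < dc.2 then dc else s) s).1 ≤ q.1)) := by
  intro F
  induction F with
  | nil =>
    intro s _ _ _ _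
    constructor
    · exact Or.inl rfl
    · intro q hq; simp only [List.mem_singleton] at hq; subst hq; exact Or.inr ⟨rfl, le_refl _⟩
  | cons x t ih =>
    intro s hpw hpos hs hfst
    rcases List.pairwise_cons.mp hpw with ⟨hx, ht⟩
    simp only [List.foldl_cons]
    by_cases h : s.2 < x.2
    · simp only [h, if_true]
      obtain ⟨hmem, hcov⟩ := ih x ht (fun q hq => hpos q (by simp [hq])) (hpos x (by simp)) hx
      have hxr : x.2 ≤ (t.foldl (fun s dc => if s.2 < dc.2 then dc else s) x).2 := by
        rcases hcov x (by simp) with h' | h' <;> omega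
      refine ⟨?_, ?_⟩
      · rcases hmem with heq | ⟨hm, hlt⟩
        · exact Or.inr ⟨by rw [heq]; simp, by rw [heq]; exact h⟩
        · exact Or.inr ⟨by simp [hm], by omega⟩
      · intro q hq
        rcases List.mem_cons.mp hq with rfl | hq
        · exact Or.inl (by omega)
        · exact hcov q hq
    · simp only [h, if_false]
      obtain ⟨hmem, hcov⟩ := ih s ht (fun q hq => hpos q (by simp [hq])) hs
        (fun q hq => hfst q (by simp [hq]))
      refine ⟨?_, ?_⟩
      · rcases hmem with heq | ⟨hm, hlt⟩
        · exact Or.inl heq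
        · exact Or.inr ⟨by simp [hm], hlt⟩
      · intro q hq
        rcases List.mem_cons.mp hq with rfl | hq
        · exact hcov q (by simp)
        · rcases List.mem_cons.mp hq with rfl | hq
          · rcases hcov s (by simp) with h' | ⟨h1, h2⟩
            · exact Or.inl (by omega)
            · by_cases hx2 : q.2 = (t.foldl (fun s dc => if s.2 < dc.2 then dc else s) s).2
              · refine Or.inr ⟨hx2, ?_⟩
                have : s.1 < q.1 := hfst q (by simp)
                omega
              · exact Or.inl (by omega)
          · exact hcov q (by simp [hq])

-- the running-max fold over max is a member of the list and dominates it
theorem pv_foldl_max_mem : ∀ (t : List Int) (x : Int), t.foldl max x ∈ x :: t := by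
  intro t
  induction t with
  | nil => intro x; simp
  | cons y t ih =>
    intro x
    simp only [List.foldl_cons]
    rcases List.mem_cons.mp (ih (max x y)) with h | h
    · rcases max_choice x y with h' | h' <;> rw [h, h'] <;> simp
    · simp [h]

theorem pv_le_foldl_max : ∀ (t : List Int) (x : Int), ∀ y ∈ x :: t, y ≤ t.foldl max x := by
  intro t
  induction t with
  | nil => intro x y hy; simp only [List.mem_singleton] at hy; simp [hy]
  | cons z t ih =>
    intro x y hy
    simp only [List.foldl_cons]
    rcases List.mem_cons.mp hy with rfl | hy
    · exact le_trans (le_max_left y z) (ih _ _ (by simp))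
    · rcases List.mem_cons.mp hy with rfl | hy
      · exact le_trans (le_max_right x y) (ih _ _ (by simp))
      · exact ih _ _ (by simp [hy])

-- max(xs) equals any member that dominates the list (and dually for min)
theorem pv_max_id (l : List Int) (v : Int) (hv : v ∈ l) (hd : ∀ x ∈ l, x ≤ v) :
    PySem.List.max? l (fun x => x) = some v := by
  match l with
  | [] => simp at hv
  | x :: t =>
    rw [PySem.List.max?_id_cons]
    have h1 : t.foldl max x ≤ v := hd _ (pv_foldl_max_mem t x)
    have h2 : v ≤ t.foldl max x := pv_le_foldl_max t x v hv
    exact congrArg some (le_antisymm h1 h2)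

theorem pv_foldl_min_mem : ∀ (t : List Int) (x : Int), t.foldl min x ∈ x :: t := by
  intro t
  induction t with
  | nil => intro x; simp
  | cons y t ih =>
    intro x
    simp only [List.foldl_cons]
    rcases List.mem_cons.mp (ih (min x y)) with h | h
    · rcases min_choice x y with h' | h' <;> rw [h, h'] <;> simp
    · simp [h]

theorem pv_foldl_min_le : ∀ (t : List Int) (x : Int), ∀ y ∈ x :: t, t.foldl min x ≤ y := by
  intro t
  induction t with
  | nil => intro x y hy; simp only [List.mem_singleton] at hy; simp [hy]
  | cons z t ih =>
    intro x y hy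
    simp only [List.foldl_cons]
    rcases List.mem_cons.mp hy with rfl | hy
    · exact le_trans (ih _ _ (by simp)) (min_le_left y z)
    · rcases List.mem_cons.mp hy with rfl | hy
      · exact le_trans (ih _ _ (by simp)) (min_le_right x y)
      · exact ih _ _ (by simp [hy])

theorem pv_min_id (l : List Int) (v : Int) (hv : v ∈ l) (hd : ∀ x ∈ l, v ≤ x) :
    PySem.List.min? l (fun x => x) = some v := by
  match l with
  | [] => simp at hv
  | x :: t =>
    rw [PySem.List.min?_id_cons]
    have h1 : v ≤ t.foldl min x := hd _ (pv_foldl_min_mem t x)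
    have h2 : t.foldl min x ≤ v := pv_foldl_min_le t x v hv
    exact congrArg some (le_antisymm h2 h1)

-- the two per-case computations agree
theorem pv_case_eq (Q : Int) (members : List (List Int)) : pvA_case Q members = pvB_best Q members := by
  simp only [pvA_case, pvB_best]
  rw [pv_count_step_eq, pv_counts_eq]
  set dates := members.flatten with hdates
  set I := (PySem.Dict.counter dates).items with hI
  have hIeq : I = (PySem.Set.ofList dates).map (fun k => (k, ((dates.count k : Nat) : Int))) := by
    rw [hI, PySem.Dict.items_counter]
  have hnd : (I.map Prod.fst).Nodup := by
    rw [hIeq, List.map_map]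
    have hcomp : (Prod.fst ∘ fun k : Int => (k, ((dates.count k : Nat) : Int))) = id := rfl
    rw [hcomp, List.map_id]
    exact PySem.Set.nodup_ofList dates
  have hpos : ∀ p ∈ I, 0 < p.2 := by
    intro p hp
    rw [hIeq] at hp
    obtain ⟨k, hk, rfl⟩ := List.mem_map.mp hp
    have hkd : k ∈ dates := (PySem.Set.mem_ofList _ _).mp hk
    have := List.count_pos_iff.mpr hkd
    simp only []
    omega
  have hSpw : (PySem.List.sorted2 I Prod.fst Prod.snd).Pairwise (fun a b => a.1 < b.1) :=
    pv_sorted2_pairwise_fst I hnd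
  have hperm : (PySem.List.sorted2 I Prod.fst Prod.snd).Perm I :=
    PySem.List.sorted2_perm I Prod.fst Prod.snd false
  rw [pv_fold_filter]
  set F := (PySem.List.sorted2 I Prod.fst Prod.snd).filter (fun p => decide (Q ≤ p.2)) with hF
  set E := I.filter (fun p => decide (Q ≤ p.2)) with hE
  -- E is the image of B's eligible list under k ↦ (k, count k)
  set elig := (PySem.List.dedup dates).filter
      (fun d => decide (Q ≤ ((dates.count d : Nat) : Int))) with helig
  have hEelig : E = elig.map (fun k => (k, ((dates.count k : Nat) : Int))) := by
    rw [hE, hIeq, List.filter_map, helig, PySem.List.dedup_eq_ofList]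
    rfl
  have hFE : F.Perm E := hperm.filter _
  have hFpw : F.Pairwise (fun a b => a.1 < b.1) := hSpw.filter _
  have hFpos : ∀ q ∈ F, 0 < q.2 :=
    fun q hq => hpos q (hperm.mem_iff.mp (List.mem_of_mem_filter hq))
  match hFc : F with
  | [] =>
    have hEnil : E = [] := (hFc ▸ hFE).symm.eq_nil
    have : elig = [] := by
      rcases helig' : elig with _ | ⟨a, t⟩
      · rfl
      · exfalso
        have : ((a, ((dates.count a : Nat) : Int)) : Int × Int) ∈ E := by
          rw [hEelig, helig']; simp
        rw [hEnil] at this; simp at this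
    rw [this]
    simp
  | x :: t =>
    rw [hFc] at hFpw hFpos hFE
    rcases List.pairwise_cons.mp hFpw with ⟨hxt, htpw⟩
    have hx2 : 0 < x.2 := hFpos x (by simp)
    have step1 : (x :: t).foldl (fun s dc => if s.2 < dc.2 then dc else s) ((0 : Int), (0 : Int))
        = t.foldl (fun s dc => if s.2 < dc.2 then dc else s) x := by
      simp only [List.foldl_cons]
      rw [if_pos hx2]
    obtain ⟨hmem, hcov⟩ := pv_foldA_aux t x htpw (fun q hq => hFpos q (by simp [hq])) hx2 hxt
    set r := t.foldl (fun s dc => if s.2 < dc.2 then dc else s) x with hr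
    have hrF : r ∈ x :: t := by
      rcases hmem with heq | ⟨hm, _⟩
      · rw [heq]; simp
      · simp [hm]
    have hr2 : 0 < r.2 := hFpos r hrF
    have hrE : r ∈ E := hFE.mem_iff.mp hrF
    obtain ⟨rk, hrk_elig, hrk⟩ := List.mem_map.mp (hEelig ▸ hrE)
    have hrk1 : r.1 = rk := by rw [← hrk]
    have hrk2 : r.2 = ((dates.count rk : Nat) : Int) := by rw [← hrk]
    -- elig is nonempty
    have heligne : elig ≠ [] := by intro h; rw [h] at hrk_elig; simp at hrk_elig
    rcases heligc : elig with _ | ⟨e0, et⟩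
    · exact absurd heligc heligne
    rw [← heligc]
    -- B's max over the counts is r.2
    have hmax : PySem.List.max? (elig.map fun d => ((dates.count d : Nat) : Int)) (fun x => x)
        = some r.2 := by
      apply pv_max_id
      · refine List.mem_map.mpr ⟨rk, hrk_elig, ?_⟩
        simpa using hrk2.symm
      · intro c hc
        obtain ⟨d, hd, rfl⟩ := List.mem_map.mp hc
        have hdE : ((d, ((dates.count d : Nat) : Int)) : Int × Int) ∈ E := by
          rw [hEelig]; exact List.mem_map.mpr ⟨d, hd, rfl⟩
        have hdF := hFE.mem_iff.mpr hdE
        rcases hcov _ hdF with h' | ⟨h', _⟩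
        · simp only [] at h' ⊢; omega
        · simp only [] at h' ⊢; omega
    -- B's min over dates with maximal count is r.1
    have hmin : PySem.List.min? (elig.filter fun d => decide (((dates.count d : Nat) : Int) = r.2))
        (fun x => x) = some r.1 := by
      apply pv_min_id
      · rw [hrk1]
        refine List.mem_filter.mpr ⟨hrk_elig, ?_⟩
        simpa using hrk2.symm
      · intro d hd
        rcases List.mem_filter.mp hd with ⟨hd1, hd2⟩
        simp only [decide_eq_true_eq] at hd2
        have hdE : ((d, ((dates.count d : Nat) : Int)) : Int × Int) ∈ E := by
          rw [hEelig]; exact List.mem_map.mpr ⟨d, hd1, rfl⟩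
        have hdF := hFE.mem_iff.mpr hdE
        rcases hcov _ hdF with h' | ⟨_, h'⟩
        · simp only [] at h'; omega
        · exact h'
    rw [heligc] at hmax hmin ⊢
    simp only [step1, hmax, Option.getD_some, hmin]
    simp [show ¬(r.2 = 0) by omega]

-- A's accumulator loop equals B's recursion with the accumulator prepended
theorem pv_loop_eq : ∀ (l : List ((Int × Int) × List (List Int))) (results : List Int),
    pvA_loop l results = results ++ find_best_meeting_date_alt l := by
  intro l
  induction l with
  | nil => intro results; simp [pvA_loop, find_best_meeting_date_alt]
  | cons c rest ih =>
    intro results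
    obtain ⟨⟨N, Q⟩, members⟩ := c
    simp only [pvA_loop, find_best_meeting_date_alt]
    by_cases h : N = 0 ∧ Q = 0
    · simp [h]
    · simp only [h, if_false, ih, pv_case_eq, List.append_assoc, List.singleton_append]

-- ===== VERDICT (by name: the statement is the Claim_ definition above) =====
theorem find_best_meeting_date_spec : Claim_equal_find_best_meeting_date := by
  intro test_cases _
  unfold Spec_find_best_meeting_date find_best_meeting_date
  rw [pv_loop_eq]
  simp
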